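-- pv_equiv track=rewrite | github.com/wing-yiu/my-first-website | flaskapp/analysis/utils/mrz.py | check_digit
-- ===== SOURCE A (Python) =====
-- def check_digit(substring) -> int:
--     """
--     Given a string, compute its check digit based on a given formula
--     http://www.highprogrammer.com/alan/numbers/mrp.html#countrycodes
--
--     The check digit calculation is as follows:
--     each position is assigned a value;
--     for the digits 0 to 9 it is the value of the digits,
--     for the letters A to Z this is 10 to 35,
--     for the filler < this is 0.
--     The value of each position is then multiplied by its weight;
--     the weight of the first position is 7, of the second it is 3, and of the third it is 1,
--     and after that the weights repeat 7, 3, 1, and so on.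
--     All values are added together and the remainder of the
--     final value divided by 10 is the check digit.
--     """
--     reference = {'<': 0, '0': 0, '1': 1, '2': 2, '3': 3, '4': 4, '5': 5,
--                  '6': 6, '7': 7, '8': 8, '9': 9, 'A': 10, 'B': 11, 'C': 12,
--                  'D': 13, 'E': 14, 'F': 15, 'G': 16, 'H': 17, 'I': 18,
--                  'J': 19, 'K': 20, 'L': 21, 'M': 22, 'N': 23, 'O': 24,
--                  'P': 25, 'Q': 26, 'R': 27, 'S': 28, 'T': 29, 'U': 30,
--                  'V': 31, 'W': 32, 'X': 33, 'Y': 34, 'Z': 35}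
--
--     # convert string to list of digits
--     charlist = [reference[char] for char in list(substring)]
--
--     # create a repeated list of [7, 3, 1]
--     checklist = [7, 3, 1] * (len(charlist)//3 + 1)
--
--     # multiply charlist by checklist
--     checkdigit = sum([a*b for a,b in zip(charlist,checklist)])
--
--     return checkdigit % 10
-- ===== SOURCE B (Python) =====
-- ALPHABET = '0123456789ABCDEFGHIJKLMNOPQRSTUVWXYZ'
--
--
-- def _column_sum(substring, i):
--     """Sum of character values at positions i, i+3, i+6, ..."""
--     total = 0
--     while i < len(substring):
--         ch = substring[i]
--         total += 0 if ch == '<' else ALPHABET.index(ch)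
--         i += 3
--     return total
--
--
-- def check_digit(substring) -> int:
--     """Column-wise: one strided pass per weight, each weight applied once to its column sum."""
--     return (7 * _column_sum(substring, 0)
--             + 3 * _column_sum(substring, 1)
--             + _column_sum(substring, 2)) % 10
-- ===== Notes on version B (the rewrite author's own statement) =====
-- stated objective: alternative
-- what changed: Replaces A's value dict and its three staged lists (charlist, repeated weight list, zipped products) with three strided column passes: each weight's column (positions i, i+3, ...) is summed separately via ALPHABET.index values and each weight is multiplied in once per column.
import Mathlib
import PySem

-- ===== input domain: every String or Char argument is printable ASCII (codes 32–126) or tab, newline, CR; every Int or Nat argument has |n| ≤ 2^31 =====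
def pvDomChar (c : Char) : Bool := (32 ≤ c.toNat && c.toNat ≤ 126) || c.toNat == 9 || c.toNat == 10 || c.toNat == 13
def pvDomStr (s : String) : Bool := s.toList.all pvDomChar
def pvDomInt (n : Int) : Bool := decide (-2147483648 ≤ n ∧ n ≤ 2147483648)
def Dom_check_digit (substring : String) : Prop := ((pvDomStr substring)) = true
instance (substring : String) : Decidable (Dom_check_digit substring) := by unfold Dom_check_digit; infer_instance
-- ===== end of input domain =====

-- B replaces A's lookup dict and three staged lists with three strided column passes (alternative decomposition, same cost).

-- ===== PORT A =====
def checkDigitReference : PySem.Dict Char Int :=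
  PySem.Dict.ofList [('<', 0), ('0', 0), ('1', 1), ('2', 2), ('3', 3), ('4', 4), ('5', 5),
    ('6', 6), ('7', 7), ('8', 8), ('9', 9), ('A', 10), ('B', 11), ('C', 12),
    ('D', 13), ('E', 14), ('F', 15), ('G', 16), ('H', 17), ('I', 18),
    ('J', 19), ('K', 20), ('L', 21), ('M', 22), ('N', 23), ('O', 24),
    ('P', 25), ('Q', 26), ('R', 27), ('S', 28), ('T', 29), ('U', 30),
    ('V', 31), ('W', 32), ('X', 33), ('Y', 34), ('Z', 35)]

def check_digit (substring : String) : Int :=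
  -- reference[char]: a missing key is a KeyError, excluded by Pre_; 0 is never returned for a missing key inside Pre_
  let charlist : List Int := substring.toList.map (fun ch => (checkDigitReference.get? ch).getD 0)
  let checklist : List Int := (List.replicate (charlist.length / 3 + 1) ([7, 3, 1] : List Int)).flatten
  let checkdigit : Int := ((charlist.zip checklist).map (fun p => p.1 * p.2)).sum
  PySem.Int.mod checkdigit 10

-- ===== PORT B =====
def mrzAlphabet : List Char := "0123456789ABCDEFGHIJKLMNOPQRSTUVWXYZ".toList

-- ALPHABET.index(ch): Python raises ValueError when ch is absent — excluded by Pre_; 0 is never returned there inside Pre_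
def bval (ch : Char) : Int :=
  if ch = '<' then 0 else ((PySem.List.index? mrzAlphabet ch).map (Int.ofNat ·)).getD 0

-- the while loop of _column_sum, structurally: i advances by 3 until i ≥ len
def columnSum (l : List Char) (i : Nat) : Int :=
  if h : i < l.length then bval l[i] + columnSum l (i + 3) else 0
  termination_by l.length - i

def check_digit_alt (substring : String) : Int :=
  PySem.Int.mod (7 * columnSum substring.toList 0
    + 3 * columnSum substring.toList 1
    + columnSum substring.toList 2) 10

-- ===== PRECONDITION & SPEC =====
-- Pre_ excludes exactly the strings containing a character outside the MRZ alphabet (the filler,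
-- the ten digits, the uppercase letters): there A raises KeyError (dict lookup fails) and B raises ValueError.
def Pre_check_digit (substring : String) : Prop :=
  (substring.toList.all (fun c => c ∈ (['<','0','1','2','3','4','5','6','7','8','9','A','B','C','D','E','F','G','H','I','J','K','L','M','N','O','P','Q','R','S','T','U','V','W','X','Y','Z'] : List Char))) = true
instance (substring : String) : Decidable (Pre_check_digit substring) := by unfold Pre_check_digit; infer_instance

def pvWitness_check_digit : String := "AB2134<<<36"

def Spec_check_digit (substring : String) (out : Int) : Prop := out = check_digit_alt substring
instance (substring : String) (out : Int) : Decidable (Spec_check_digit substring out) := by unfold Spec_check_digit; infer_instance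

-- ===== CLAIM (what is proved, stated in full; the proofs are below) =====
def Claim_equal_check_digit : Prop := ∀ (substring : String), Dom_check_digit substring → Pre_check_digit substring → Spec_check_digit substring (check_digit substring)

-- ===== LEMMAS AND PROOFS =====

-- proof-side literal form of A's reference dict
set_option maxRecDepth 8000 in
lemma ref_mk : checkDigitReference = PySem.Dict.mk [('<', 0), ('0', 0), ('1', 1), ('2', 2), ('3', 3), ('4', 4), ('5', 5),
    ('6', 6), ('7', 7), ('8', 8), ('9', 9), ('A', 10), ('B', 11), ('C', 12),
    ('D', 13), ('E', 14), ('F', 15), ('G', 16), ('H', 17), ('I', 18),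
    ('J', 19), ('K', 20), ('L', 21), ('M', 22), ('N', 23), ('O', 24),
    ('P', 25), ('Q', 26), ('R', 27), ('S', 28), ('T', 29), ('U', 30),
    ('V', 31), ('W', 32), ('X', 33), ('Y', 34), ('Z', 35)] := by decide

-- the dict lookup of A and the alphabet scan of B give the same value on every admitted character
set_option maxRecDepth 4000 in
lemma val_eq : ∀ c ∈ (['<','0','1','2','3','4','5','6','7','8','9','A','B','C','D','E','F','G','H','I','J','K','L','M','N','O','P','Q','R','S','T','U','V','W','X','Y','Z'] : List Char),
    ((checkDigitReference.get? c).getD 0 : Int) = bval c := by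
  rw [ref_mk]
  intro c hc
  fin_cases hc <;> decide

lemma columnSum_of_le (l : List Char) (i : Nat) (h : l.length ≤ i) : columnSum l i = 0 := by
  rw [columnSum]
  simp [Nat.not_lt.mpr h]

-- shifting the list by one shifts the start index by one
lemma columnSum_shift (x : Char) (l : List Char) :
    ∀ (d i : Nat), l.length - i ≤ d → columnSum (x :: l) (i + 1) = columnSum l i := by
  intro d
  induction d with
  | zero =>
    intro i hi
    have h : l.length ≤ i := by omega
    rw [columnSum_of_le l i h, columnSum_of_le (x :: l) (i + 1) (by simp; omega)]
  | succ d ih =>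
    intro i hi
    by_cases h : i < l.length
    · conv_lhs => rw [columnSum]
      conv_rhs => rw [columnSum]
      have h1 : i + 1 < (x :: l).length := by simp; omega
      simp only [h1, reduceDIte, h, reduceDIte, List.getElem_cons_succ]
      rw [show i + 1 + 3 = (i + 3) + 1 by omega, ih (i + 3) (by omega)]
    · rw [columnSum_of_le l i (by omega), columnSum_of_le (x :: l) (i + 1) (by simp; omega)]

lemma columnSum_shift' (x : Char) (l : List Char) (i : Nat) :
    columnSum (x :: l) (i + 1) = columnSum l i :=
  columnSum_shift x l (l.length - i) i le_rfl

lemma columnSum_cons3_0 (a b c : Char) (r : List Char) :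
    columnSum (a :: b :: c :: r) 0 = bval a + columnSum r 0 := by
  rw [columnSum]
  simp only [List.length_cons, show 0 < r.length + 1 + 1 + 1 by omega, reduceDIte]
  rw [show (0 + 3 : Nat) = 2 + 1 by rfl, columnSum_shift' a,
      show (2 : Nat) = 1 + 1 by rfl, columnSum_shift' b, columnSum_shift' c]
  rfl

lemma columnSum_cons3_1 (a b c : Char) (r : List Char) :
    columnSum (a :: b :: c :: r) 1 = bval b + columnSum r 1 := by
  rw [show (1 : Nat) = 0 + 1 by rfl, columnSum_shift' a]
  rw [columnSum]
  simp only [List.length_cons, show 0 < r.length + 1 + 1 by omega, reduceDIte]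
  rw [show (0 + 3 : Nat) = 2 + 1 by rfl, columnSum_shift' b,
      show (2 : Nat) = 1 + 1 by rfl, columnSum_shift' c]
  rfl

lemma columnSum_cons3_2 (a b c : Char) (r : List Char) :
    columnSum (a :: b :: c :: r) 2 = bval c + columnSum r 2 := by
  rw [show (2 : Nat) = 1 + 1 by rfl, columnSum_shift' a,
      show (1 : Nat) = 0 + 1 by rfl, columnSum_shift' b]
  rw [columnSum]
  simp only [List.length_cons, show 0 < r.length + 1 by omega, reduceDIte]
  rw [show (0 + 3 : Nat) = 2 + 1 by rfl, columnSum_shift' c]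
  rfl

-- A's zip-with-repeated-weights sum equals B's three weighted column sums (chars already mapped to bval)
lemma zip_sum_eq_columns : ∀ (n : Nat) (l : List Char) (m : Nat), l.length = n → l.length ≤ 3 * m →
    (((l.map bval).zip ((List.replicate m ([7, 3, 1] : List Int)).flatten)).map (fun p => p.1 * p.2)).sum
      = 7 * columnSum l 0 + 3 * columnSum l 1 + columnSum l 2 := by
  intro n
  induction n using Nat.strong_induction_on with
  | _ n ih =>
    intro l m hn hm
    match l with
    | [] => simp [columnSum_of_le]
    | [a] =>
      obtain ⟨m', rfl⟩ : ∃ m', m = m' + 1 :=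
        ⟨m - 1, by have : 1 ≤ 3 * m := (by simpa using hm); omega⟩
      have h0 : columnSum [a] 0 = bval a := by
        rw [columnSum]; simp [columnSum_of_le]
      rw [List.replicate_succ, List.flatten_cons, h0,
          columnSum_of_le [a] 1 (by simp), columnSum_of_le [a] 2 (by simp)]
      simp; ring
    | [a, b] =>
      obtain ⟨m', rfl⟩ : ∃ m', m = m' + 1 :=
        ⟨m - 1, by have : 2 ≤ 3 * m := (by simpa using hm); omega⟩
      have h0 : columnSum [a, b] 0 = bval a := by
        rw [columnSum]; simp [columnSum_of_le]
      have h1 : columnSum [a, b] 1 = bval b := by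
        rw [show (1 : Nat) = 0 + 1 by rfl, columnSum_shift' a, columnSum]
        simp [columnSum_of_le]
      rw [List.replicate_succ, List.flatten_cons, h0, h1,
          columnSum_of_le [a, b] 2 (by simp)]
      simp; ring
    | a :: b :: c :: r =>
      obtain ⟨m', rfl⟩ : ∃ m', m = m' + 1 :=
        ⟨m - 1, by have : 3 ≤ 3 * m := (by simp at hm; omega); omega⟩
      rw [List.replicate_succ, List.flatten_cons]
      simp only [List.map_cons, List.cons_append, List.nil_append, List.zip_cons_cons,
        List.sum_cons]
      rw [columnSum_cons3_0, columnSum_cons3_1, columnSum_cons3_2]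
      have hr : r.length = n - 3 := by simp at hn; omega
      rw [ih (n - 3) (by simp at hn; omega) r m' hr (by simp at hn hm ⊢; omega)]
      ring

-- ===== VERDICT (by name: the statement is the Claim_ definition above) =====
theorem check_digit_spec : Claim_equal_check_digit := by
  intro s _ hpre
  have hmap : s.toList.map (fun ch => (checkDigitReference.get? ch).getD 0) = s.toList.map bval :=
    List.map_congr_left (fun c hc =>
      val_eq c (of_decide_eq_true ((List.all_eq_true.mp hpre) c hc)))
  unfold Spec_check_digit check_digit check_digit_alt
  simp only [hmap, List.length_map]
  rw [zip_sum_eq_columns s.toList.length s.toList (s.toList.length / 3 + 1) rfl (by omega)]
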